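-- pv_equiv track=rewrite | github.com/Angela-OH/Algorithm | 기타/SpringCode3.py | solution
-- ===== SOURCE A (Python) =====
-- def solution(queries):
--     answer = []
--     for query in queries:
--         l = len(query)
--
--         if l == 2:
--             val = (query[1] - query[0])
--         elif l == 3:
--             val = (query[2] - query[0] + query[1])
--         elif l == 4:
--             val = (query[3] - query[0] + query[2] - query[1])
--         else:
--             val = (query[4] - query[0] + query[3] - query[1] + query[2])
--
--         if val % 2 == 1:
--             answer.append(1)
--         else:
--             answer.append(0)
--
--     return answer
-- ===== SOURCE B (Python) =====
-- def solution(queries):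
--     # Parity of an alternating sum equals the parity of the plain sum
--     # (since -x and x are congruent mod 2), so each answer bit is just
--     # sum of the first (at most) five elements, mod 2.
--     return [sum(q[:5]) % 2 for q in queries]
-- ===== Notes on version B (the rewrite author's own statement) =====
-- stated objective: simpler
-- what changed: Uses the parity invariance of subtraction (-x = x mod 2) to replace A's four length-branched alternating-sum expressions by sum(q[:5]) % 2, with no branches at all.
import Mathlib
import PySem

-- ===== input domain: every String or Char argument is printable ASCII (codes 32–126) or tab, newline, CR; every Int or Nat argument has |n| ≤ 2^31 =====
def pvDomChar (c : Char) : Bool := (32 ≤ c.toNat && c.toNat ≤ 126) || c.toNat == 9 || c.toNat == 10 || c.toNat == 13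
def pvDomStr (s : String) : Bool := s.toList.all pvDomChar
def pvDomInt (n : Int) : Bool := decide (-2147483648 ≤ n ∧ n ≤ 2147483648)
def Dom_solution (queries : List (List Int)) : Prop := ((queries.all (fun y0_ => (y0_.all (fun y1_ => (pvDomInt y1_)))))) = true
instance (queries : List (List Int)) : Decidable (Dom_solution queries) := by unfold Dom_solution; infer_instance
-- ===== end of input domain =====

-- B uses that subtraction preserves parity (-x ≡ x mod 2): each bit is sum(q[:5]) % 2,
-- replacing A's four length-branched alternating-sum expressions (return-value equivalence).

-- ===== PORT A =====
def solution (queries : List (List Int)) : List Int :=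
  queries.foldl (fun answer query =>
    let l := query.length
    let val : Int :=
      if l = 2 then PySem.List.pyGetD query 1 0 - PySem.List.pyGetD query 0 0
      else if l = 3 then
        PySem.List.pyGetD query 2 0 - PySem.List.pyGetD query 0 0 + PySem.List.pyGetD query 1 0
      else if l = 4 then
        PySem.List.pyGetD query 3 0 - PySem.List.pyGetD query 0 0 +
          PySem.List.pyGetD query 2 0 - PySem.List.pyGetD query 1 0
      else
        PySem.List.pyGetD query 4 0 - PySem.List.pyGetD query 0 0 +
          PySem.List.pyGetD query 3 0 - PySem.List.pyGetD query 1 0 + PySem.List.pyGetD query 2 0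
    answer ++ [if PySem.Int.mod val 2 = 1 then 1 else 0]) []

-- ===== PORT B =====
def solution_alt (queries : List (List Int)) : List Int :=
  queries.map (fun q => PySem.Int.mod (PySem.List.slice q none (some 5)).sum 2)

-- ===== PRECONDITION & SPEC =====
-- Pre_ excludes exactly the inputs where A raises IndexError: a query of length 0 or 1
-- makes A's else-branch read query[4].
def Pre_solution (queries : List (List Int)) : Prop :=
  ∀ q ∈ queries, 2 ≤ q.length
instance (queries : List (List Int)) : Decidable (Pre_solution queries) := by
  unfold Pre_solution; infer_instance

def pvWitness_solution : List (List Int) := [[1, 2], [3, 4, 5, 6, 7, 8]]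

def Spec_solution (queries : List (List Int)) (out : List Int) : Prop := out = solution_alt queries
instance (queries : List (List Int)) (out : List Int) : Decidable (Spec_solution queries out) := by unfold Spec_solution; infer_instance

-- ===== CLAIM (what is proved, stated in full; the proofs are below) =====
def Claim_equal_solution : Prop := ∀ (queries : List (List Int)), Dom_solution queries → Pre_solution queries → Spec_solution queries (solution queries)

-- ===== LEMMAS AND PROOFS =====

-- A's per-query bit, named for the proof only.
def aBit (query : List Int) : Int :=
  let l := query.length
  let val : Int :=
    if l = 2 then PySem.List.pyGetD query 1 0 - PySem.List.pyGetD query 0 0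
    else if l = 3 then
      PySem.List.pyGetD query 2 0 - PySem.List.pyGetD query 0 0 + PySem.List.pyGetD query 1 0
    else if l = 4 then
      PySem.List.pyGetD query 3 0 - PySem.List.pyGetD query 0 0 +
        PySem.List.pyGetD query 2 0 - PySem.List.pyGetD query 1 0
    else
      PySem.List.pyGetD query 4 0 - PySem.List.pyGetD query 0 0 +
        PySem.List.pyGetD query 3 0 - PySem.List.pyGetD query 1 0 + PySem.List.pyGetD query 2 0
  if PySem.Int.mod val 2 = 1 then 1 else 0

lemma solution_eq_map (queries : List (List Int)) : solution queries = queries.map aBit := by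
  unfold solution
  rw [PySem.List.foldl_append_singleton_eq_map]
  rfl

lemma bit_eq (q : List Int) (hq : 2 ≤ q.length) :
    aBit q = PySem.Int.mod (PySem.List.slice q none (some 5)).sum 2 := by
  match q, hq with
  | [a, b], _ =>
    simp [aBit, PySem.List.slice, PySem.List.pyGetD, PySem.List.pyGet?, PySem.List.pyIdx?]
    split_ifs <;> omega
  | [a, b, c], _ =>
    simp [aBit, PySem.List.slice, PySem.List.pyGetD, PySem.List.pyGet?, PySem.List.pyIdx?]
    split_ifs <;> omega
  | [a, b, c, d], _ =>
    simp [aBit, PySem.List.slice, PySem.List.pyGetD, PySem.List.pyGet?, PySem.List.pyIdx?]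
    split_ifs <;> omega
  | a :: b :: c :: d :: e :: t, _ =>
    have h2 : ¬ (a :: b :: c :: d :: e :: t).length = 2 := by simp
    have h3 : ¬ (a :: b :: c :: d :: e :: t).length = 3 := by simp
    have h4 : ¬ (a :: b :: c :: d :: e :: t).length = 4 := by simp
    have hs : PySem.List.slice (a :: b :: c :: d :: e :: t) none (some 5)
        = [a, b, c, d, e] := by
      simp [PySem.List.slice, List.take]
    have g4 : PySem.List.pyGetD (a :: b :: c :: d :: e :: t) 4 0 = e := by
      simp [PySem.List.pyGetD, PySem.List.pyGet?, PySem.List.pyIdx?]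
      rw [if_pos (by omega)]; simp
    have g3 : PySem.List.pyGetD (a :: b :: c :: d :: e :: t) 3 0 = d := by
      simp [PySem.List.pyGetD, PySem.List.pyGet?, PySem.List.pyIdx?]
      rw [if_pos (by omega)]; simp
    have g2 : PySem.List.pyGetD (a :: b :: c :: d :: e :: t) 2 0 = c := by
      simp [PySem.List.pyGetD, PySem.List.pyGet?, PySem.List.pyIdx?]
      rw [if_pos (by omega)]; simp
    have g1 : PySem.List.pyGetD (a :: b :: c :: d :: e :: t) 1 0 = b := by
      simp [PySem.List.pyGetD, PySem.List.pyGet?, PySem.List.pyIdx?]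
      rw [if_pos (by omega)]; simp
    have g0 : PySem.List.pyGetD (a :: b :: c :: d :: e :: t) 0 0 = a := by
      simp [PySem.List.pyGetD, PySem.List.pyGet?, PySem.List.pyIdx?]
      rw [if_pos (by omega)]; simp
    simp only [aBit, hs, if_neg h2, if_neg h3, if_neg h4, g0, g1, g2, g3, g4, List.sum_cons,
      List.sum_nil]
    rw [PySem.Int.mod_eq_emod_of_pos (by norm_num), PySem.Int.mod_eq_emod_of_pos (by norm_num)]
    split_ifs <;> omega

-- ===== VERDICT (by name: the statement is the Claim_ definition above) =====
theorem solution_spec : Claim_equal_solution := by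
  intro queries _ hpre
  unfold Spec_solution solution_alt
  rw [solution_eq_map]
  exact List.map_congr_left fun q hq => bit_eq q (hpre q hq)
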